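-- pv_equiv track=rewrite | github.com/vibhor-77/agi-mvp-arc-agi-1 | domains/arc/primitives.py | ggravity_up
-- ===== SOURCE A (Python) =====
-- Grid = list[list[int]]
--
-- def _rows(g: Grid) -> int:
--     return len(g)
--
-- def _cols(g: Grid) -> int:
--     return len(g[0]) if g else 0
--
-- def ggravity_up(g: Grid) -> Grid:
--     """Non-zero cells float to the top of their column."""
--     rows, cols = _rows(g), _cols(g)
--     result = [[0] * cols for _ in range(rows)]
--     for c in range(cols):
--         col = [g[r][c] for r in range(rows) if g[r][c] != 0]
--         for i, v in enumerate(col):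
--             result[i][c] = v
--     return result
-- ===== SOURCE B (Python) =====
-- def ggravity_up(g):
--     """Non-zero cells float to the top of their column."""
--     # stable sort: key False (non-zero) sorts before True (zero), ties keep order
--     cols = [sorted(col, key=lambda v: v == 0) for col in zip(*g)]
--     if cols:
--         return [list(row) for row in zip(*cols)]
--     return [[] for _ in g]
-- ===== Notes on version B (the rewrite author's own statement) =====
-- stated objective: alternative
-- what changed: B transposes the grid and produces each output column by a stable sort with key (v == 0) (Python's sorted moves the zeros to the back while keeping non-zeros in order), then transposes back, instead of A's gather-the-nonzeros pass that writes into a preallocated zero grid.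
import Mathlib
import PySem

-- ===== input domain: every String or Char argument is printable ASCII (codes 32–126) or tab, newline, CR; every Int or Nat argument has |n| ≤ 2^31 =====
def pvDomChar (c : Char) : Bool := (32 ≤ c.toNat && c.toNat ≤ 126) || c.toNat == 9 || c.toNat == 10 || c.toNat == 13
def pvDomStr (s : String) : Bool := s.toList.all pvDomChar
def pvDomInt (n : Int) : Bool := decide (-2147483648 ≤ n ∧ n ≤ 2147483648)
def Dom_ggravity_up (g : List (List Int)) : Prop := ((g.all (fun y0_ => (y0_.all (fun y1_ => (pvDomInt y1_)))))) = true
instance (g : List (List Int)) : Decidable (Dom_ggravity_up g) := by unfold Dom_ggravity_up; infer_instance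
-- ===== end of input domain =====

-- B transposes the grid, stably sorts each column with key (v == 0) so zeros sink to the
-- bottom, and transposes back, instead of A's gather-nonzeros pass into a preallocated grid.

-- ===== PORT A =====
def ggravity_up (g : List (List Int)) : List (List Int) :=
  let rows : Nat := g.length
  let cols : Nat := (g.headD []).length
  let result : List (List Int) :=
    (PySem.List.pyRange 0 rows 1).map (fun _ => List.replicate cols (0 : Int))
  (PySem.List.pyRange 0 cols 1).foldl (fun result c =>
    let col : List Int :=
      ((PySem.List.pyRange 0 rows 1).map
        (fun r => PySem.List.pyGetD (PySem.List.pyGetD g r []) c 0)).filter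
        (fun v => v ≠ 0)
    (PySem.List.enumerate col 0).foldl (fun result iv =>
      PySem.List.pySetD result iv.1
        (PySem.List.pySetD (PySem.List.pyGetD result iv.1 []) c iv.2)) result) result

-- ===== PORT B =====
-- hand-ported zip(*g): exact — the transpose truncated at the shortest row
def zipStar (g : List (List Int)) : List (List Int) :=
  if h : g ≠ [] ∧ ∀ r ∈ g, r ≠ [] then
    (g.map (fun r => r.headD 0)) :: zipStar (g.map (fun r => r.tail))
  else []
termination_by (g.headD []).length
decreasing_by
  rcases g with _ | ⟨x, t⟩
  · exact absurd rfl h.1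
  · have hx : x ≠ [] := h.2 x (by simp)
    rcases x with _ | ⟨a, xt⟩
    · exact absurd rfl hx
    · simp

def ggravity_up_alt (g : List (List Int)) : List (List Int) :=
  let cols : List (List Int) :=
    (zipStar g).map (fun col => PySem.List.sorted col (fun v => v == 0))
  if cols.isEmpty then g.map (fun _ => ([] : List Int)) else zipStar cols

-- ===== PRECONDITION & SPEC =====
-- Pre_ excludes exactly the ragged grids on which Python A raises IndexError
-- (some row shorter than the first row).
def Pre_ggravity_up (g : List (List Int)) : Prop :=
  ∀ row ∈ g, (g.headD []).length ≤ row.length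
instance (g : List (List Int)) : Decidable (Pre_ggravity_up g) := by
  unfold Pre_ggravity_up; infer_instance
def pvWitness_ggravity_up : List (List Int) := [[1, 0], [0, 2], [3, 4]]
def Spec_ggravity_up (g : List (List Int)) (out : List (List Int)) : Prop := out = ggravity_up_alt g
instance (g : List (List Int)) (out : List (List Int)) : Decidable (Spec_ggravity_up g out) := by
  unfold Spec_ggravity_up; infer_instance

-- ===== CLAIM (what is proved, stated in full; the proofs are below) =====
def Claim_equal_ggravity_up : Prop := ∀ (g : List (List Int)), Dom_ggravity_up g → Pre_ggravity_up g → Spec_ggravity_up g (ggravity_up g)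

-- ===== LEMMAS AND PROOFS =====

-- the non-zero entries of column c (as A's comprehension computes them)
def colv (g : List (List Int)) (c : Int) : List Int :=
  (g.map (fun row => PySem.List.pyGetD row c 0)).filter (fun v => v ≠ 0)

-- the common elementwise description of both outputs
def build (g : List (List Int)) : List (List Int) :=
  (List.range g.length).map (fun r =>
    (List.range (g.headD []).length).map (fun (c : Nat) => (colv g (c : Int)).getD r 0))

theorem pyRange0 (n : Nat) :
    PySem.List.pyRange 0 (n:Int) 1 = (List.range n).map (fun (k : Nat) => (k:Int)) := by
  rw [PySem.List.pyRange_one]; simp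

theorem pyRangeMap {α : Type} (n : Nat) (f : Int → α) :
    (PySem.List.pyRange 0 (n:Int) 1).map f = (List.range n).map (fun (k : Nat) => f (k:Int)) := by
  rw [pyRange0, List.map_map]; rfl

theorem pad_getD (nz : List Int) (n r : Nat) :
    (nz ++ List.replicate n (0:Int)).getD r 0 = nz.getD r 0 := by
  rcases lt_or_ge r nz.length with h | h
  · simp [List.getD_eq_getElem?_getD, List.getElem?_append_left h]
  · simp [List.getD_eq_getElem?_getD, List.getElem?_append_right h, List.getElem?_replicate,
      List.getElem?_eq_none h]
    split_ifs <;> simp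

theorem colv_len_le (g : List (List Int)) (c : Int) : (colv g c).length ≤ g.length := by
  calc (colv g c).length ≤ (g.map (fun row => PySem.List.pyGetD row c 0)).length :=
        List.length_filter_le _ _
    _ = g.length := List.length_map ..

theorem map_getD_range {α : Type} (m : List α) (d : α) :
    (List.range m.length).map (fun r => m.getD r d) = m := by
  apply List.ext_getElem
  · simp
  · intro i h1 h2; simp [List.getElem?_eq_getElem h2]

-- ---- B side: the stable sort by (v == 0) is "non-zeros then zeros" ----

theorem insertBy_skip (before : Int → Int → Bool) (x : Int) (A Z : List Int)
    (h : ∀ a ∈ A, before x a = false) :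
    PySem.List.insertBy before x (A ++ Z) = A ++ PySem.List.insertBy before x Z := by
  induction A with
  | nil => simp
  | cons a A ih =>
    simp only [List.cons_append, PySem.List.insertBy]
    rw [h a (by simp)]
    simp [ih (fun a ha => h a (by simp [ha]))]

theorem insertBy_end (before : Int → Int → Bool) (x : Int) (Z : List Int)
    (h : ∀ z ∈ Z, before x z = false) :
    PySem.List.insertBy before x Z = Z ++ [x] := by
  induction Z with
  | nil => simp [PySem.List.insertBy]
  | cons z Z ih =>
    simp only [PySem.List.insertBy]
    rw [h z (by simp), ih (fun z hz => h z (by simp [hz]))]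
    simp

theorem sortedBool (xs : List Int) :
    PySem.List.sorted xs (fun v => v == 0)
      = xs.filter (fun v => !(v == 0)) ++ xs.filter (fun v => v == 0) := by
  rw [PySem.List.sorted_eq_foldl_insertBy]
  have key : ∀ (xs A Z : List Int), (∀ a ∈ A, (a == 0) = false) → (∀ z ∈ Z, (z == 0) = true) →
      xs.foldl (fun acc x =>
          PySem.List.insertBy (fun a b => decide ((a == 0) < (b == 0))) x acc) (A ++ Z)
      = (A ++ xs.filter (fun v => !(v == 0))) ++ (Z ++ xs.filter (fun v => v == 0)) := by
    intro xs
    induction xs with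
    | nil => intro A Z _ _; simp
    | cons x xs ih =>
      intro A Z hA hZ
      simp only [List.foldl_cons]
      by_cases hx : (x == 0) = true
      · have hstep : PySem.List.insertBy (fun a b => decide ((a == 0) < (b == 0))) x (A ++ Z)
            = (A ++ (Z ++ [x])) := by
          rw [insertBy_end _ _ _ (by
            intro z hz
            rcases List.mem_append.1 hz with h | h
            · simp [hx, hA z h]
            · simp [hx, hZ z h]), List.append_assoc]
        rw [hstep, ih A (Z ++ [x]) hA (by
          intro z hz
          rcases List.mem_append.1 hz with h | h
          · exact hZ z h
          · simp at h; simp [h, hx])]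
        simp [hx]
      · have hx' : (x == 0) = false := by simpa using hx
        have hstep : PySem.List.insertBy (fun a b => decide ((a == 0) < (b == 0))) x (A ++ Z)
            = (A ++ [x]) ++ Z := by
          rw [insertBy_skip _ _ _ _ (by intro a ha; simp [hx', hA a ha])]
          rcases Z with _ | ⟨z, Z⟩
          · simp [PySem.List.insertBy]
          · simp only [PySem.List.insertBy]
            rw [if_pos (by simp [hx', hZ z (by simp)])]
            simp
        rw [hstep, ih (A ++ [x]) Z (by
          intro a ha
          rcases List.mem_append.1 ha with h | h
          · exact hA a h
          · simp at h; simp [h, hx']) hZ]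
        simp [hx']
  simpa using key xs [] [] (by simp) (by simp)

theorem filter_zero_replicate (xs : List Int) :
    xs.filter (fun v => v == 0)
      = List.replicate (xs.filter (fun v => v == 0)).length (0:Int) := by
  rw [List.eq_replicate_iff]
  refine ⟨rfl, ?_⟩
  intro b hb
  have := List.of_mem_filter hb
  simpa using this

-- ---- characterization of the hand-ported zip(*·) on sufficiently long rows ----

theorem zipStar_char (n : Nat) : ∀ (m : List (List Int)), m ≠ [] →
    (m.headD []).length = n → (∀ r ∈ m, n ≤ r.length) →
    zipStar m = (List.range n).map (fun i => m.map (fun r => r.getD i 0)) := by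
  induction n with
  | zero =>
    intro m hm hh _
    rw [zipStar]
    rw [dif_neg]
    · simp
    · rintro ⟨h1, h2⟩
      rcases m with _ | ⟨x, t⟩
      · exact hm rfl
      · have : x ≠ [] := h2 x (by simp)
        simp at hh
        exact this hh
  | succ n ih =>
    intro m hm hh hlen
    rw [zipStar]
    rw [dif_pos ⟨hm, by
      intro r hr
      have := hlen r hr
      intro hnil; subst hnil; simp at this⟩]
    have hmt : m.map (fun r => r.tail) ≠ [] := by simpa using hm
    have hht : ((m.map (fun r => r.tail)).headD []).length = n := by
      rcases m with _ | ⟨x, t⟩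
      · exact absurd rfl hm
      · simp at hh ⊢; omega
    have hlt : ∀ r ∈ m.map (fun r => r.tail), n ≤ r.length := by
      intro r hr
      rcases List.mem_map.1 hr with ⟨s, hs, rfl⟩
      have := hlen s hs
      simp; omega
    rw [ih _ hmt hht hlt]
    rw [List.range_succ_eq_map]
    simp only [List.map_cons, List.map_map]
    congr 1
    · apply List.map_congr_left
      intro r hr
      have hrn : r ≠ [] := by
        have := hlen r hr; intro hnil; subst hnil; simp at this
      rcases r with _ | ⟨a, t⟩
      · exact absurd rfl hrn
      · simp
    · apply List.map_congr_left
      intro i _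
      simp only [Function.comp]
      apply List.map_congr_left
      intro r hr
      have : r ≠ [] := by
        have := hlen r hr; intro hnil; subst hnil; simp at this
      rcases r with _ | ⟨a, t⟩
      · exact absurd rfl this
      · simp

-- colv written with plain getD, under Pre_
theorem colv_eq (g : List (List Int)) (c : Nat) :
    colv g (c : Int) = (g.map (fun r => r.getD c 0)).filter (fun v => !(v == 0)) := by
  unfold colv
  have hmap : g.map (fun row => PySem.List.pyGetD row (c : Int) 0)
      = g.map (fun r => r.getD c 0) := by
    apply List.map_congr_left
    intro row hrow
    rw [PySem.List.pyGetD_natCast]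
  rw [hmap]
  congr 1
  funext v
  by_cases h : v = 0 <;> simp [h]

theorem charB (g : List (List Int)) (hpre : Pre_ggravity_up g) :
    ggravity_up_alt g = build g := by
  unfold ggravity_up_alt
  rcases g with _ | ⟨x, t⟩
  · simp [zipStar, build]
  set g := x :: t with hg
  have hgne : g ≠ [] := by simp [hg]
  set C := (g.headD []).length with hC
  have hz : zipStar g = (List.range C).map (fun c => g.map (fun r => r.getD c 0)) :=
    zipStar_char C g hgne rfl hpre
  by_cases hC0 : C = 0
  · have hcols : (zipStar g).map (fun col => PySem.List.sorted col (fun v => v == 0)) = [] := by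
      rw [hz, hC0]; simp
    rw [hcols]
    simp only [List.isEmpty_nil, if_pos]
    unfold build
    rw [← hC, hC0]
    simp
  · set cols := (zipStar g).map (fun col => PySem.List.sorted col (fun v => v == 0)) with hcols
    have hcolsv : cols = (List.range C).map (fun c =>
        PySem.List.sorted (g.map (fun r => r.getD c 0)) (fun v => v == 0)) := by
      rw [hcols, hz, List.map_map]; rfl
    have hcne : ¬ cols.isEmpty := by
      rw [hcolsv]
      simp [List.isEmpty_iff, List.range_eq_nil, hC0]
    rw [if_neg hcne]
    have hlen : ∀ col ∈ cols, col.length = g.length := by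
      intro col hcol
      rw [hcolsv] at hcol
      rcases List.mem_map.1 hcol with ⟨c, _, rfl⟩
      rw [PySem.List.length_sorted, List.length_map]
    have hcolsne : cols ≠ [] := by
      intro h; rw [h] at hcne; simp at hcne
    have hhead : (cols.headD []).length = g.length := by
      rcases hc : cols with _ | ⟨c0, ct⟩
      · exact absurd hc hcolsne
      · simpa using hlen c0 (by rw [hc]; simp)
    rw [zipStar_char g.length cols hcolsne hhead (fun r hr => le_of_eq (hlen r hr).symm)]
    unfold build
    rw [← hC]
    apply List.map_congr_left
    intro r hr
    rw [hcolsv, List.map_map]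
    apply List.map_congr_left
    intro c hc
    simp only [Function.comp]
    rw [sortedBool, filter_zero_replicate, pad_getD,
        colv_eq g c]

-- ---- A side ----

-- the body of A's outer loop over columns
def stepA (g : List (List Int)) (result : List (List Int)) (c : Int) : List (List Int) :=
  let col : List Int :=
    ((PySem.List.pyRange 0 (g.length : Nat) 1).map
      (fun r => PySem.List.pyGetD (PySem.List.pyGetD g r []) c 0)).filter
      (fun v => v ≠ 0)
  (PySem.List.enumerate col 0).foldl (fun result iv =>
    PySem.List.pySetD result iv.1
      (PySem.List.pySetD (PySem.List.pyGetD result iv.1 []) c iv.2)) result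

-- state of A's grid after the first k columns have been processed
def matM (g : List (List Int)) (k : Nat) : List (List Int) :=
  (List.range g.length).map (fun r =>
    (List.range (g.headD []).length).map (fun (c : Nat) =>
      if c < k then (colv g (c : Int)).getD r 0 else 0))

theorem enumFold (c : Int) (xs : List Int) (s : Nat) (m : List (List Int))
    (h : s + xs.length ≤ m.length) :
    (PySem.List.enumerate xs (s:Int)).foldl (fun result iv =>
        PySem.List.pySetD result iv.1
          (PySem.List.pySetD (PySem.List.pyGetD result iv.1 []) c iv.2)) m
    = (List.range m.length).map (fun r =>
        if s ≤ r ∧ r < s + xs.length then PySem.List.pySetD (m.getD r []) c (xs.getD (r - s) 0)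
        else m.getD r []) := by
  induction xs generalizing s m with
  | nil =>
    simp only [PySem.List.enumerate_nil, List.foldl_nil]
    have : ∀ r, r ∈ List.range m.length →
        (if s ≤ r ∧ r < s + ([] : List Int).length then
          PySem.List.pySetD (m.getD r []) c (([] : List Int).getD (r - s) 0) else m.getD r [])
        = m.getD r [] := by
      intro r _; rw [if_neg]; simp
    rw [List.map_congr_left this, map_getD_range]
  | cons x xs ih =>
    rw [PySem.List.enumerate_cons]
    simp only [List.foldl_cons]
    rw [PySem.List.pyGetD_natCast, PySem.List.pySetD_natCast]
    have hcast : ((s:Int)) + 1 = (((s+1 : Nat)) : Int) := by push_cast; ring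
    rw [hcast, ih (s+1) _ (by simp at h ⊢; omega)]
    rw [List.length_set]
    apply List.map_congr_left
    intro r hr
    simp only [List.mem_range] at hr
    by_cases hrs : r = s
    · subst hrs
      rw [if_neg (by omega), if_pos (by simp)]
      rw [List.getD_eq_getElem _ _ (by simpa using hr), List.getElem_set_self]
      simp
    · have hset : (m.set s (PySem.List.pySetD (m.getD s []) c x)).getD r [] = m.getD r [] := by
        rw [List.getD_eq_getElem _ _ (by simpa using hr),
            List.getD_eq_getElem _ _ hr, List.getElem_set_ne (by omega)]
      by_cases hin : s + 1 ≤ r ∧ r < s + 1 + xs.length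
      · rw [if_pos hin, if_pos (by simp; omega), hset]
        have : r - s = (r - (s+1)) + 1 := by omega
        rw [this]
        simp
      · rw [if_neg hin, if_neg (by simp; omega), hset]

theorem colA (g : List (List Int)) (c : Int) :
    ((PySem.List.pyRange 0 (g.length : Nat) 1).map
      (fun r => PySem.List.pyGetD (PySem.List.pyGetD g r []) c 0)).filter
      (fun v => v ≠ 0) = colv g c := by
  unfold colv
  congr 1
  rw [show (fun r => PySem.List.pyGetD (PySem.List.pyGetD g r []) c 0)
        = (fun row => PySem.List.pyGetD row c 0) ∘ (fun r => PySem.List.pyGetD g r []) from rfl,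
      ← List.map_map, show ((g.length:Int)) = PySem.List.len g from rfl,
      PySem.List.map_pyGetD_pyRange_zero]

theorem matM_length (g : List (List Int)) (k : Nat) : (matM g k).length = g.length := by
  simp [matM]

theorem stepA_matM (g : List (List Int)) (k : Nat) (hk : k < (g.headD []).length) :
    stepA g (matM g k) (k : Int) = matM g (k+1) := by
  unfold stepA
  rw [colA]
  rw [show ((0:Int)) = ((0:Nat):Int) from rfl]
  rw [enumFold _ _ _ _ (by rw [matM_length]; simpa using colv_len_le g (k:Int))]
  rw [matM_length]
  unfold matM
  apply List.ext_getElem (by simp)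
  intro r h1 h2
  simp only [List.getElem_map, List.getElem_range]
  rw [List.getD_eq_getElem _ _ (by simpa using h1)]
  have hrg : r < g.length := by simpa using h2
  simp only [List.getElem_map, List.getElem_range]
  rw [PySem.List.pySetD_natCast]
  by_cases hb : r < (colv g (k:Int)).length
  · rw [if_pos (by omega)]
    apply List.ext_getElem (by simp)
    intro c hc1 hc2
    have hcc : c < (g.headD []).length := by simpa using hc2
    simp only [List.getElem_set, List.getElem_map, List.getElem_range]
    rcases eq_or_ne c k with hck | hck
    · subst hck
      rw [if_pos rfl, if_pos (by omega)]
      simp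
    · rw [if_neg (Ne.symm hck)]
      by_cases hlt : c < k
      · rw [if_pos hlt, if_pos (by omega)]
      · rw [if_neg hlt, if_neg (by omega)]
  · rw [if_neg (by omega)]
    apply List.ext_getElem (by simp)
    intro c hc1 hc2
    simp only [List.getElem_map, List.getElem_range]
    rcases eq_or_ne c k with hck | hck
    · subst hck
      rw [if_neg (by omega), if_pos (by omega)]
      rw [List.getD_eq_default _ _ (by omega)]
    · by_cases hlt : c < k
      · rw [if_pos hlt, if_pos (by omega)]
      · rw [if_neg hlt, if_neg (by omega)]

theorem charA (g : List (List Int)) : ggravity_up g = build g := by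
  have hfold : ∀ k, k ≤ (g.headD []).length →
      (PySem.List.pyRange 0 (k:Int) 1).foldl (stepA g)
        ((PySem.List.pyRange 0 (g.length:Int) 1).map (fun _ => List.replicate (g.headD []).length (0:Int)))
      = matM g k := by
    intro k
    induction k with
    | zero =>
      intro _
      rw [show PySem.List.pyRange 0 ((0:Nat):Int) 1 = [] from PySem.List.pyRange_one_eq_nil (by omega)]
      simp only [List.foldl_nil]
      rw [pyRangeMap]
      unfold matM
      apply List.map_congr_left
      intro r _
      apply List.ext_getElem (by simp)
      intro c h1 h2
      simp
    | succ k ih =>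
      intro hk
      have hc1 : ((k+1 : Nat) : Int) = (k:Int) + 1 := by push_cast; ring
      rw [hc1, PySem.List.pyRange_one_succ_right (by positivity), List.foldl_append]
      simp only [List.foldl_cons, List.foldl_nil]
      rw [ih (by omega), stepA_matM g k (by omega)]
  have hA : ggravity_up g = (PySem.List.pyRange 0 ((g.headD []).length : Int) 1).foldl (stepA g)
      ((PySem.List.pyRange 0 (g.length:Int) 1).map (fun _ => List.replicate (g.headD []).length (0:Int))) := rfl
  rw [hA, hfold _ le_rfl]
  unfold matM build
  apply List.map_congr_left; intro r _
  apply List.map_congr_left; intro c hc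
  rw [if_pos (by simpa using hc)]

-- ===== VERDICT (by name: the statement is the Claim_ definition above) =====
theorem ggravity_up_spec : Claim_equal_ggravity_up := by
  intro g _ hpre
  unfold Spec_ggravity_up
  rw [charA, charB g hpre]
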